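-- pv_equiv track=rewrite | github.com/osso841/stark_3 | stark-003 Terminado/funciones.py | obtener_personaje_caracteristica
-- ===== SOURCE A (Python) =====
-- def obtener_personaje_caracteristica(lista_personajes:list, caracteristica:str) -> dict: #10 11
--     '''devuelve un diccionario cuya clave son las caracteristica especificada y sus valores un diccionario de personajes
--
--     Args:
--         lista_personajes(list): lista de diccionarios que representa los personajes
--         caracteristica(str): clave de los diccionarios que representa los personajes
--
--     Return:
--         dict: diccionario de caracteristicas
--         false: si por lo menos una de las caracteristicas no se encuentra en los diccionarios
--     '''
--
--     dict_salida = {}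
--
--     for personajes in lista_personajes:
--
--         caracteristica_normalizada = str(personajes[caracteristica]).capitalize()
--         if caracteristica not in personajes:
--             return False
--
--         if caracteristica_normalizada not in dict_salida:
--             if caracteristica_normalizada == "":
--                 continue
--             dict_salida[caracteristica_normalizada] = []
--         dict_salida[caracteristica_normalizada].append(personajes['nombre'])
--
--     return dict_salida
-- ===== SOURCE B (Python) =====
-- def obtener_personaje_caracteristica(lista_personajes: list, caracteristica: str) -> dict:
--     claves = []
--     for p in lista_personajes:
--         c = str(p[caracteristica]).capitalize()
--         if c != "" and c not in claves:
--             claves.append(c)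
--     return {c: [p['nombre'] for p in lista_personajes
--                 if str(p[caracteristica]).capitalize() == c]
--             for c in claves}
-- ===== Notes on version B (the rewrite author's own statement) =====
-- stated objective: alternative
-- what changed: B first collects the distinct non-empty capitalized characteristic values in first-occurrence order, then builds each group with a separate comprehension pass over the list, instead of A's single pass that appends names into a growing dict.
import Mathlib
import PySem

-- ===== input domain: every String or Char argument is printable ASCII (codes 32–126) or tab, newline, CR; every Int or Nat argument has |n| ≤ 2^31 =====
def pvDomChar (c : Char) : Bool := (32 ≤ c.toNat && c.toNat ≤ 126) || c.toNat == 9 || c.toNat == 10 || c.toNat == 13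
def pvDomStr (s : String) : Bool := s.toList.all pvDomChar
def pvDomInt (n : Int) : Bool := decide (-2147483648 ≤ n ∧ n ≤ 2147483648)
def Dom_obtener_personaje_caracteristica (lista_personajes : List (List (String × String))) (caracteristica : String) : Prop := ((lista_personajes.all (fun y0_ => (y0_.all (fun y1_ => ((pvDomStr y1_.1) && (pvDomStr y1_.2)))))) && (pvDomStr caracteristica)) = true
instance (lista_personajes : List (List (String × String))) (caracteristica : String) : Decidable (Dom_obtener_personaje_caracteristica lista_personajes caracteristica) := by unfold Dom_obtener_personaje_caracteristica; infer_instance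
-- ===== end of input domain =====

-- B groups by two passes (collect the distinct non-empty capitalized keys in first-occurrence
-- order, then one comprehension per key) instead of A's single pass into a growing dict;
-- objective: alternative decomposition, same return value.

-- str.capitalize(), exact on the ASCII domain: first char uppercased, the rest lowercased
def pvCapChars : List Char → List Char
  | [] => []
  | c :: t => c.toUpper :: t.map Char.toLower

def pvCap (s : String) : String := String.ofList (pvCapChars s.toList)

-- ===== PORT A =====
-- the loop of A: state = dict_salida (insertion-ordered dict); none = an exception (KeyError)
def pvGoA (car : String) : PySem.Dict String (List String) → List (List (String × String)) → Option (List (String × List String))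
  | d, [] => some d.items
  | d, p :: rest =>
    match (PySem.Dict.mk p).get? car with
    | none => none  -- KeyError: personajes[caracteristica]
    | some v =>
      let cn := pvCap v    -- str(...) is the identity: the values are already strings
      if (PySem.Dict.mk p).contains car = false then
        none  -- 'return False' — unreachable (the lookup above succeeded); False is not a dict
      else if d.contains cn = false then
        if cn = "" then pvGoA car d rest   -- continue
        else
          match (PySem.Dict.mk p).get? "nombre" with
          | none => none  -- KeyError: personajes['nombre']
          | some nm => pvGoA car ((d.insert cn []).modify cn [] (· ++ [nm])) rest
      else
        match (PySem.Dict.mk p).get? "nombre" with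
        | none => none  -- KeyError: personajes['nombre']
        | some nm => pvGoA car (d.modify cn [] (· ++ [nm])) rest

def obtener_personaje_caracteristica (lista_personajes : List (List (String × String))) (caracteristica : String) : Option (List (String × List String)) :=
  pvGoA caracteristica (PySem.Dict.mk []) lista_personajes

-- ===== PORT B =====
def pvClave? (car : String) (p : List (String × String)) : Option String :=
  ((PySem.Dict.mk p).get? car).map pvCap

-- B's first loop: the distinct non-empty capitalized keys, in first-occurrence order
def pvClavesB (car : String) : List String → List (List (String × String)) → Option (List String)
  | acc, [] => some acc
  | acc, p :: rest =>
    match pvClave? car p with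
    | none => none
    | some c => pvClavesB car (if c ≠ "" ∧ c ∉ acc then acc ++ [c] else acc) rest

-- B's inner comprehension: the names of the personajes whose capitalized key is c
def pvNamesB (car c : String) : List (List (String × String)) → Option (List String)
  | [] => some []
  | p :: rest =>
    match pvClave? car p with
    | none => none
    | some cp =>
      if cp = c then
        match (PySem.Dict.mk p).get? "nombre" with
        | none => none
        | some nm => (pvNamesB car c rest).map (nm :: ·)
      else pvNamesB car c rest

def obtener_personaje_caracteristica_alt (lista_personajes : List (List (String × String))) (caracteristica : String) : Option (List (String × List String)) :=
  match pvClavesB caracteristica [] lista_personajes with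
  | none => none
  | some ks => ks.mapM (fun c => (pvNamesB caracteristica c lista_personajes).map (fun ns => (c, ns)))

-- ===== PRECONDITION & SPEC =====
def pvClaveD (car : String) (p : List (String × String)) : String :=
  pvCap (((PySem.Dict.mk p).get? car).getD "")

-- exactly the inputs where the Python A returns: every personaje has the caracteristica key,
-- and every personaje with a non-empty capitalized value has the 'nombre' key (KeyError otherwise)
def Pre_obtener_personaje_caracteristica (lista_personajes : List (List (String × String))) (caracteristica : String) : Prop :=
  ∀ p ∈ lista_personajes, ((PySem.Dict.mk p).get? caracteristica).isSome = true ∧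
    (pvClaveD caracteristica p ≠ "" → ((PySem.Dict.mk p).get? "nombre").isSome = true)

instance (lista_personajes : List (List (String × String))) (caracteristica : String) : Decidable (Pre_obtener_personaje_caracteristica lista_personajes caracteristica) := by unfold Pre_obtener_personaje_caracteristica; infer_instance

def pvWitness_obtener_personaje_caracteristica : (List (List (String × String))) × String :=
  ([[("color", "rojo"), ("nombre", "Ana")], [("color", "ROJO"), ("nombre", "Bo")], [("color", ""), ("edad", "7")]], "color")

def Spec_obtener_personaje_caracteristica (lista_personajes : List (List (String × String))) (caracteristica : String) (out : Option (List (String × List String))) : Prop := out = obtener_personaje_caracteristica_alt lista_personajes caracteristica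
instance (lista_personajes : List (List (String × String))) (caracteristica : String) (out : Option (List (String × List String))) : Decidable (Spec_obtener_personaje_caracteristica lista_personajes caracteristica out) := by unfold Spec_obtener_personaje_caracteristica; infer_instance

-- ===== CLAIM (what is proved, stated in full; the proofs are below) =====
def Claim_equal_obtener_personaje_caracteristica : Prop := ∀ (lista_personajes : List (List (String × String))) (caracteristica : String), Dom_obtener_personaje_caracteristica lista_personajes caracteristica → Pre_obtener_personaje_caracteristica lista_personajes caracteristica → Spec_obtener_personaje_caracteristica lista_personajes caracteristica (obtener_personaje_caracteristica lista_personajes caracteristica)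

-- ===== LEMMAS AND PROOFS =====

-- total spec-side descriptions of what both programs compute (only used in the proofs)
def pvName (p : List (String × String)) : String := ((PySem.Dict.mk p).get? "nombre").getD ""

def pvNames (car c : String) (l : List (List (String × String))) : List String :=
  l.foldr (fun p acc => if pvClaveD car p = c then pvName p :: acc else acc) []

def pvNewK (car : String) : List String → List (List (String × String)) → List String
  | _, [] => []
  | K, p :: rest =>
    if pvClaveD car p ≠ "" ∧ pvClaveD car p ∉ K then
      pvClaveD car p :: pvNewK car (K ++ [pvClaveD car p]) rest
    else pvNewK car K rest

theorem pvNewK_mem (car : String) : ∀ (l : List (List (String × String))) (K : List String) (x : String),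
    x ∈ pvNewK car K l → x ∉ K ∧ x ≠ "" := by
  intro l
  induction l with
  | nil => intro K x h; simp [pvNewK] at h
  | cons p rest ih =>
    intro K x h
    simp only [pvNewK] at h
    split at h
    · rename_i hc
      rcases List.mem_cons.1 h with h | h
      · exact ⟨h ▸ hc.2, h ▸ hc.1⟩
      · have := ih _ _ h
        refine ⟨fun hx => this.1 (by simp [hx]), this.2⟩
    · exact ih _ _ h

theorem pvClavesB_eq (car : String) : ∀ (l : List (List (String × String))) (K : List String),
    (∀ p ∈ l, ((PySem.Dict.mk p).get? car).isSome = true) →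
    pvClavesB car K l = some (K ++ pvNewK car K l) := by
  intro l
  induction l with
  | nil => intro K _; simp [pvClavesB, pvNewK]
  | cons p rest ih =>
    intro K h
    obtain ⟨v, hv⟩ := Option.isSome_iff_exists.1 (h p (by simp))
    have hcl : pvClaveD car p = pvCap v := by simp [pvClaveD, hv]
    simp only [pvClavesB, pvClave?, hv, Option.map_some]
    rw [ih _ (fun q hq => h q (by simp [hq]))]
    simp only [pvNewK, hcl]
    split
    · simp
    · rfl

theorem pvNamesB_eq (car c : String) (hc : c ≠ "") : ∀ (l : List (List (String × String))),
    (∀ p ∈ l, ((PySem.Dict.mk p).get? car).isSome = true ∧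
      (pvClaveD car p ≠ "" → ((PySem.Dict.mk p).get? "nombre").isSome = true)) →
    pvNamesB car c l = some (pvNames car c l) := by
  intro l
  induction l with
  | nil => intro _; simp [pvNamesB, pvNames]
  | cons p rest ih =>
    intro h
    obtain ⟨v, hv⟩ := Option.isSome_iff_exists.1 (h p (by simp)).1
    have hcl : pvClaveD car p = pvCap v := by simp [pvClaveD, hv]
    simp only [pvNamesB, pvClave?, hv, Option.map_some]
    have hrest : pvNamesB car c rest = some (pvNames car c rest) :=
      ih (fun q hq => h q (by simp [hq]))
    by_cases hcp : pvCap v = c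
    · have hne : pvClaveD car p ≠ "" := by rw [hcl, hcp]; exact hc
      obtain ⟨nm, hnm⟩ := Option.isSome_iff_exists.1 ((h p (by simp)).2 hne)
      have hnmv : pvName p = nm := by simp [pvName, hnm]
      rw [if_pos hcp]
      simp only [hnm, hrest, Option.map_some]
      simp [pvNames, hcl, hcp, hnmv]
    · rw [if_neg hcp, hrest]
      simp [pvNames, hcl, hcp]

theorem pvAppend_congr {α : Type} {a b c d : List α} (h1 : a = c) (h2 : b = d) : a ++ b = c ++ d := by
  rw [h1, h2]

theorem pvNames_cons (car c : String) (p : List (String × String)) (rest : List (List (String × String))) :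
    pvNames car c (p :: rest) = if pvClaveD car p = c then pvName p :: pvNames car c rest else pvNames car c rest := rfl

-- items of A's 'dict_salida[cn] = []; dict_salida[cn].append(nm)' when cn is a NEW key
theorem pvItems_new (d : PySem.Dict String (List String)) (cn nm : String)
    (h : d.contains cn = false) :
    ((d.insert cn []).modify cn [] (· ++ [nm])).items = d.items ++ [(cn, [nm])] := by
  have hall : ∀ kv ∈ d.items, (kv.1 == cn) = false := by
    intro kv hkv
    by_contra hx
    rw [Bool.not_eq_false] at hx
    have : d.contains cn = true := by
      simp only [PySem.Dict.contains]
      exact List.any_eq_true.2 ⟨kv, hkv, hx⟩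
    simp [this] at h
  have hins : (d.insert cn ([] : List String)).items = d.items ++ [(cn, [])] := by
    simp [PySem.Dict.insert, h]
  have hcont2 : (d.insert cn ([] : List String)).contains cn = true := by
    simp [PySem.Dict.contains, hins]
  have hgetD : (d.insert cn ([] : List String)).getD cn [] = [] := PySem.Dict.getD_insert_self ..
  have hmain : ∀ (e : PySem.Dict String (List String)), e.contains cn = true → e.getD cn [] = [] →
      e.items = d.items ++ [(cn, [])] →
      (e.modify cn [] (· ++ [nm])).items = d.items ++ [(cn, [nm])] := by
    intro e hc hg hi
    simp only [PySem.Dict.modify, hg, PySem.Dict.insert, hc, if_true, hi]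
    rw [List.map_append]
    congr 1
    · conv_rhs => rw [← List.map_id d.items]
      exact List.map_congr_left (fun kv hkv => by simp [hall kv hkv])
    · simp
  exact hmain _ hcont2 hgetD hins

-- items of A's 'dict_salida[cn].append(nm)' when cn is an EXISTING key (keys unique)
theorem pvItems_mod_aux (cn nm : String) : ∀ (l : List (String × List String)),
    (l.map Prod.fst).Nodup → l.any (·.1 == cn) = true →
    l.map (fun p => if (p.1 == cn) = true then (cn, ((Option.map Prod.snd (l.find? (·.1 == cn))).getD []) ++ [nm]) else p)
      = l.map (fun kv => if kv.1 = cn then (kv.1, kv.2 ++ [nm]) else kv) := by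
  intro l
  induction l with
  | nil => intro _ h; simp at h
  | cons kv t ih =>
    intro hnod hany
    by_cases hk : kv.1 = cn
    · have hfind : List.find? (·.1 == cn) (kv :: t) = some kv := by
        simp [hk]
      have htail : ∀ q ∈ t, q.1 ≠ cn := by
        intro q hq hqc
        have : kv.1 ∈ t.map Prod.fst := by
          rw [hk, ← hqc]; exact List.mem_map_of_mem hq
        exact (List.nodup_cons.1 hnod).1 this
      simp only [hfind, List.map_cons]
      rw [if_pos (by simp [hk]), if_pos hk]
      refine congrArg₂ List.cons (by simp [hk]) ?_
      apply List.map_congr_left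
      intro q hq
      rw [if_neg (by simp [htail q hq]), if_neg (htail q hq)]
    · have hfind : List.find? (·.1 == cn) (kv :: t) = List.find? (·.1 == cn) t := by
        simp [hk]
      have hany' : t.any (·.1 == cn) = true := by
        rcases List.any_eq_true.1 hany with ⟨q, hq, hqc⟩
        rcases List.mem_cons.1 hq with rfl | hq'
        · exact absurd (by simpa using hqc) hk
        · exact List.any_eq_true.2 ⟨q, hq', hqc⟩
      simp only [hfind, List.map_cons]
      rw [if_neg (by simp [hk]), if_neg hk]
      exact congrArg₂ List.cons rfl (ih (List.nodup_cons.1 hnod).2 hany')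

theorem pvItems_mod (d : PySem.Dict String (List String)) (cn nm : String)
    (hnod : (d.items.map Prod.fst).Nodup) (h : d.contains cn = true) :
    (d.modify cn [] (· ++ [nm])).items
      = d.items.map (fun kv => if kv.1 = cn then (kv.1, kv.2 ++ [nm]) else kv) := by
  simp only [PySem.Dict.modify, PySem.Dict.insert, PySem.Dict.getD, PySem.Dict.get?, h, if_true]
  exact pvItems_mod_aux cn nm d.items hnod (by simpa [PySem.Dict.contains] using h)

theorem pvGoA_eq (car : String) : ∀ (l : List (List (String × String))) (d : PySem.Dict String (List String)),
    (∀ p ∈ l, ((PySem.Dict.mk p).get? car).isSome = true ∧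
      (pvClaveD car p ≠ "" → ((PySem.Dict.mk p).get? "nombre").isSome = true)) →
    "" ∉ d.keys → d.keys.Nodup →
    pvGoA car d l = some (d.items.map (fun kv => (kv.1, kv.2 ++ pvNames car kv.1 l)) ++
      (pvNewK car d.keys l).map (fun c => (c, pvNames car c l))) := by
  intro l
  induction l with
  | nil =>
    intro d _ _ _
    simp [pvGoA, pvNames, pvNewK]
  | cons p rest ih =>
    intro d h h0 hnod
    obtain ⟨v, hv⟩ := Option.isSome_iff_exists.1 (h p (by simp)).1
    have hcl : pvClaveD car p = pvCap v := by simp [pvClaveD, hv]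
    have hcont : (PySem.Dict.mk p).contains car = true := by
      rw [PySem.Dict.contains_eq_isSome_get?, hv]; rfl
    have hrest : ∀ q ∈ rest, ((PySem.Dict.mk q).get? car).isSome = true ∧
        (pvClaveD car q ≠ "" → ((PySem.Dict.mk q).get? "nombre").isSome = true) :=
      fun q hq => h q (by simp [hq])
    by_cases hmem : pvCap v ∈ d.keys
    · -- existing key: dict_salida[cn].append(nombre)
      have hdc : d.contains (pvCap v) = true := by
        rw [PySem.Dict.contains_eq_decide_mem_keys]; exact decide_eq_true hmem
      have hne : pvClaveD car p ≠ "" := by rw [hcl]; intro hx; exact h0 (hx ▸ hmem)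
      obtain ⟨nm, hnm⟩ := Option.isSome_iff_exists.1 ((h p (by simp)).2 hne)
      have hnmv : pvName p = nm := by simp [pvName, hnm]
      have hgoal : pvGoA car d (p :: rest) = pvGoA car (d.modify (pvCap v) [] (· ++ [nm])) rest := by
        simp [pvGoA, hv, hcont, hdc, hnm]
      rw [hgoal]
      have hitems := pvItems_mod d (pvCap v) nm hnod hdc
      have hkeys : (d.modify (pvCap v) [] (· ++ [nm])).keys = d.keys := by
        show (d.modify (pvCap v) [] (· ++ [nm])).items.map (·.1) = d.items.map (·.1)
        rw [hitems, List.map_map]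
        exact List.map_congr_left (fun kv _ => by by_cases hkc : kv.1 = pvCap v <;> simp [hkc])
      rw [ih _ hrest (by rw [hkeys]; exact h0) (by rw [hkeys]; exact hnod)]
      rw [hkeys, hitems, List.map_map]
      refine congrArg some (pvAppend_congr ?_ ?_)
      · apply List.map_congr_left
        intro kv hkv
        by_cases hkc : kv.1 = pvCap v
        · simp [Function.comp, pvNames_cons, hcl, hkc, hnmv]
        · have hkc' : ¬ pvCap v = kv.1 := fun hx => hkc hx.symm
          simp [Function.comp, pvNames_cons, hcl, hkc, hkc']
      · have hnk : pvNewK car d.keys (p :: rest) = pvNewK car d.keys rest := by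
          rw [pvNewK]
          rw [if_neg (by rw [hcl]; exact fun hx => hx.2 hmem)]
        rw [hnk]
        apply List.map_congr_left
        intro c hc
        have hcK := pvNewK_mem car rest d.keys c hc
        rw [pvNames_cons, if_neg (by rw [hcl]; intro hx; exact hcK.1 (hx ▸ hmem))]
    · have hdc : d.contains (pvCap v) = false := by
        rw [PySem.Dict.contains_eq_decide_mem_keys]; exact decide_eq_false hmem
      by_cases hcap0 : pvCap v = ""
      · -- empty key: continue
        have hdc' : d.contains "" = false := hcap0 ▸ hdc
        have hgoal : pvGoA car d (p :: rest) = pvGoA car d rest := by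
          simp [pvGoA, hv, hcont, hdc', hcap0]
        rw [hgoal, ih d hrest h0 hnod]
        have hnk : pvNewK car d.keys (p :: rest) = pvNewK car d.keys rest := by
          rw [pvNewK, if_neg (by rw [hcl, hcap0]; exact fun hx => hx.1 rfl)]
        rw [hnk]
        refine congrArg some (pvAppend_congr ?_ ?_)
        · apply List.map_congr_left
          intro kv hkv
          have hkne : kv.1 ≠ "" := fun hx => h0 (hx ▸ List.mem_map_of_mem hkv)
          rw [pvNames_cons, if_neg (by rw [hcl, hcap0]; exact fun hx => hkne hx.symm)]
        · apply List.map_congr_left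
          intro c hc
          have hcK := pvNewK_mem car rest d.keys c hc
          rw [pvNames_cons, if_neg (by rw [hcl, hcap0]; exact fun hx => hcK.2 hx.symm)]
      · -- new key: dict_salida[cn] = []; append(nombre)
        have hne : pvClaveD car p ≠ "" := by rw [hcl]; exact hcap0
        obtain ⟨nm, hnm⟩ := Option.isSome_iff_exists.1 ((h p (by simp)).2 hne)
        have hnmv : pvName p = nm := by simp [pvName, hnm]
        have hgoal : pvGoA car d (p :: rest)
            = pvGoA car ((d.insert (pvCap v) []).modify (pvCap v) [] (· ++ [nm])) rest := by
          simp [pvGoA, hv, hcont, hdc, hcap0, hnm]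
        rw [hgoal]
        have hitems := pvItems_new d (pvCap v) nm hdc
        have hkeys : ((d.insert (pvCap v) []).modify (pvCap v) [] (· ++ [nm])).keys = d.keys ++ [pvCap v] := by
          show ((d.insert (pvCap v) []).modify (pvCap v) [] (· ++ [nm])).items.map (·.1) = _
          rw [hitems, List.map_append]
          rfl
        have h0' : "" ∉ d.keys ++ [pvCap v] := by
          simp only [List.mem_append, List.mem_singleton]
          rintro (hx | hx)
          · exact h0 hx
          · exact hcap0 hx.symm
        have hnod' : (d.keys ++ [pvCap v]).Nodup := by
          rw [List.nodup_append]
          refine ⟨hnod, List.nodup_singleton _, ?_⟩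
          intro x hx y hy
          rw [List.mem_singleton] at hy
          subst hy
          exact fun hxy => hmem (hxy ▸ hx)
        rw [ih _ hrest (by rw [hkeys]; exact h0') (by rw [hkeys]; exact hnod')]
        rw [hkeys, hitems]
        have hnk : pvNewK car d.keys (p :: rest)
            = pvCap v :: pvNewK car (d.keys ++ [pvCap v]) rest := by
          rw [pvNewK, if_pos (by rw [hcl]; exact ⟨hcap0, hmem⟩), hcl]
        rw [hnk, List.map_append, List.map_cons]
        rw [List.append_assoc]
        refine congrArg some (pvAppend_congr ?_ ?_)
        · apply List.map_congr_left
          intro kv hkv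
          have hkne : kv.1 ≠ pvCap v := fun hx => hmem (hx ▸ List.mem_map_of_mem hkv)
          rw [pvNames_cons, if_neg (by rw [hcl]; exact fun hx => hkne hx.symm)]
        · simp only [List.map_cons, List.map_nil]
          refine congrArg₂ List.cons ?_ ?_
          · simp [pvNames_cons, hcl, hnmv]
          · apply List.map_congr_left
            intro c hc
            have hcK := pvNewK_mem car rest (d.keys ++ [pvCap v]) c hc
            rw [pvNames_cons, if_neg (by rw [hcl]; intro hx; exact hcK.1 (by simp [hx]))]

theorem pvMapM_eq (car : String) (l : List (List (String × String)))
    (hpre : ∀ p ∈ l, ((PySem.Dict.mk p).get? car).isSome = true ∧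
      (pvClaveD car p ≠ "" → ((PySem.Dict.mk p).get? "nombre").isSome = true)) :
    ∀ (ks : List String), (∀ c ∈ ks, c ≠ "") →
    ks.mapM (fun c => (pvNamesB car c l).map (fun ns => (c, ns)))
      = some (ks.map (fun c => (c, pvNames car c l))) := by
  intro ks
  induction ks with
  | nil => intro _; rfl
  | cons c t ih =>
    intro h
    rw [List.mapM_cons]
    rw [pvNamesB_eq car c (h c (by simp)) l hpre, ih (fun x hx => h x (by simp [hx]))]
    rfl

-- ===== VERDICT (by name: the statement is the Claim_ definition above) =====
theorem obtener_personaje_caracteristica_spec : Claim_equal_obtener_personaje_caracteristica := by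
  intro l car _ hpre
  show obtener_personaje_caracteristica l car = obtener_personaje_caracteristica_alt l car
  have hcar : ∀ p ∈ l, ((PySem.Dict.mk p).get? car).isSome = true := fun p hp => (hpre p hp).1
  rw [obtener_personaje_caracteristica, obtener_personaje_caracteristica_alt]
  rw [pvGoA_eq car l (PySem.Dict.mk []) hpre (by simp [PySem.Dict.keys]) (by simp [PySem.Dict.keys])]
  rw [pvClavesB_eq car l [] hcar]
  simp only [List.nil_append]
  rw [pvMapM_eq car l hpre (pvNewK car [] l) (fun c hc => (pvNewK_mem car l [] c hc).2)]
  simp [PySem.Dict.keys]
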